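-- pv_equiv track=rewrite | github.com/DanHChampion/BlockusAI | src/helpers/logic.py | is_move_legal
-- ===== SOURCE A (Python) =====
-- def is_cell_within_bounds(board, cell): # cell = [row,col]
--     rows = cols = len(board)
--     if 0 <= cell[0] < rows and 0 <= cell[1] < cols:
--         return True
--     return False
--
-- def is_cell_free(board, cell): # cell = [row,col]
--     if is_cell_within_bounds(board, cell):
--         if get_cell_colour(board, cell) == 0:
--             return True
--     return False
--
-- def is_cell_adjacent_to_colour(board, cell, colour): # cell = [row,col]
--     adj_cells = [
--                     [cell[0] - 1,cell[1]],  # Top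
--                     [cell[0] + 1, cell[1]],  # Bottom
--                     [cell[0], cell[1] - 1],  # Left
--                     [cell[0], cell[1] + 1]   # Right
--                 ]
--     for adj_cell in adj_cells:
--         if is_cell_within_bounds(board, adj_cell):
--             if get_cell_colour(board, adj_cell) == colour:
--                 return True
--     return False
--
-- def get_cell_colour(board, cell):
--     return board[cell[0]][cell[1]]
--
-- def is_move_legal(board, move, colour, legal_corners):
--     # Check if the piece has at least one tile on a legal corner
--     piece = move[0]
--     cell = move[1]
--     legal = False
--
--     for row in range(len(piece)):
--         for col in range(len(piece[row])):
--             if piece[row][col]:  # Check if this cell of the piece is occupied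
--                 current_cell = [cell[0] + row, cell[1] + col]
--
--                 # Check if the cell is within bounds and free
--                 if not is_cell_within_bounds(board, current_cell) or not is_cell_free(board, current_cell):
--                     return False
--
--                 # Check if the cell is adjacent to the same colour
--                 if is_cell_adjacent_to_colour(board, current_cell, colour):
--                     return False
--
--                 # Check if the piece has at least one tile on a legal corner
--                 if current_cell in legal_corners:
--                     legal = True
--
--     return legal
-- ===== SOURCE B (Python) =====
-- def is_move_legal(board, move, colour, legal_corners):
--     # Inverted algorithm: build the SET of absolute occupied positions once, then
--     # scan the BOARD: every scanned position occupied by the piece must be empty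
--     # (counting them checks bounds at the end), and every board cell already of
--     # `colour` must have no piece tile among its 4 neighbours (adjacency checked
--     # from the board side, by symmetry). Finally check the corner condition.
--     piece, base = move
--     occ = {(base[0] + r, base[1] + c)
--            for r, row in enumerate(piece)
--            for c, v in enumerate(row) if v}
--     n = len(board)
--     inside = 0
--     for r in range(n):
--         for c in range(n):
--             if (r, c) in occ:
--                 inside += 1
--                 if board[r][c] != 0:
--                     return False
--             if board[r][c] == colour:
--                 if ((r - 1, c) in occ or (r + 1, c) in occ
--                         or (r, c - 1) in occ or (r, c + 1) in occ):
--                     return False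
--     if inside != len(occ):
--         return False  # some tile falls outside the board
--     return any([pr, pc] in legal_corners for (pr, pc) in occ)
-- ===== Notes on version B (the rewrite author's own statement) =====
-- stated objective: alternative
-- what changed: B inverts the traversal: it builds the set of absolute occupied positions once, then scans the whole BOARD grid - counting occupied positions it meets (bounds check by cardinality), requiring them empty, and checking adjacency from the board side (each board cell of `colour` must have no occupied neighbour, by symmetry of adjacency) - instead of A's single nested loop over the piece with per-tile bounds/free/adjacency probes and a `legal` flag.
-- outside the precondition, e.g. on is_move_legal([[0, 0], [0]], ([[1]], [0, 0]), 1, []): A returns False, B raises IndexError; on is_move_legal([[0]], ([], [0]), 1, []): A returns False, B returns False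
import Mathlib
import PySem

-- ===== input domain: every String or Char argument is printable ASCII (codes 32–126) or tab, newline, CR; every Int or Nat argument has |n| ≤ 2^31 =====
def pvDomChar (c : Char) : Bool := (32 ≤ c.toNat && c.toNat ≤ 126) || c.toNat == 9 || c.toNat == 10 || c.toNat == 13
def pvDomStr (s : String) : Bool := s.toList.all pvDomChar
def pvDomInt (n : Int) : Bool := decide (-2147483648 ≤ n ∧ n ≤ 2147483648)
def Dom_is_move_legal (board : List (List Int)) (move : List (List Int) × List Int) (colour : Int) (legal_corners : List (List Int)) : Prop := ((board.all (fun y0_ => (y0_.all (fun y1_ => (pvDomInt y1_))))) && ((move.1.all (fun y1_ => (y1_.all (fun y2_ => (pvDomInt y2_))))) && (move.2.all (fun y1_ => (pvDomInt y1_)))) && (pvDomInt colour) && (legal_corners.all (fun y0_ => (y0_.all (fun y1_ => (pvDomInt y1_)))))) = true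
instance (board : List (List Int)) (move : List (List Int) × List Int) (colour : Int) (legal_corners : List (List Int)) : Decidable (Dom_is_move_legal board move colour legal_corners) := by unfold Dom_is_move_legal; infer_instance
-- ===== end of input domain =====

-- B inverts the traversal: it builds the SET of absolute occupied positions once and then
-- scans the board grid (free/bounds checked by counting, adjacency checked from the board
-- side by symmetry), instead of A's nested piece loop with per-tile probes; objective:
-- alternative algorithm, similar cost.

-- ===== PORT A =====
-- shared module helpers, transliterated (indexing via PySem.List.pyGetD, exact under Pre_)
def is_cell_within_bounds (board : List (List Int)) (cell : List Int) : Bool :=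
  decide (0 ≤ PySem.List.pyGetD cell 0 0 ∧ PySem.List.pyGetD cell 0 0 < (board.length : Int) ∧
          0 ≤ PySem.List.pyGetD cell 1 0 ∧ PySem.List.pyGetD cell 1 0 < (board.length : Int))

def get_cell_colour (board : List (List Int)) (cell : List Int) : Int :=
  PySem.List.pyGetD (PySem.List.pyGetD board (PySem.List.pyGetD cell 0 0) [])
    (PySem.List.pyGetD cell 1 0) 0

def is_cell_free (board : List (List Int)) (cell : List Int) : Bool :=
  is_cell_within_bounds board cell && (get_cell_colour board cell == 0)

def is_cell_adjacent_to_colour (board : List (List Int)) (cell : List Int) (colour : Int) : Bool :=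
  let r := PySem.List.pyGetD cell 0 0
  let c := PySem.List.pyGetD cell 1 0
  [[r - 1, c], [r + 1, c], [r, c - 1], [r, c + 1]].any
    (fun a => is_cell_within_bounds board a && (get_cell_colour board a == colour))

-- A's nested for-loops with early 'return False' and the 'legal' accumulator:
-- state Sum.inl legal = still looping, Sum.inr r = returned r.
def is_move_legal (board : List (List Int)) (move : List (List Int) × List Int) (colour : Int) (legal_corners : List (List Int)) : Bool :=
  let piece := move.1
  let cell := move.2
  let st : Bool ⊕ Bool :=
    (PySem.List.enumerate piece).foldl (fun (st : Bool ⊕ Bool) (rp : Int × List Int) =>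
      (PySem.List.enumerate rp.2).foldl (fun (st : Bool ⊕ Bool) (cp : Int × Int) =>
        match st with
        | Sum.inr r => Sum.inr r
        | Sum.inl legal =>
          if cp.2 ≠ 0 then
            let cur := [PySem.List.pyGetD cell 0 0 + rp.1, PySem.List.pyGetD cell 1 0 + cp.1]
            if !(is_cell_within_bounds board cur) || !(is_cell_free board cur) then Sum.inr false
            else if is_cell_adjacent_to_colour board cur colour then Sum.inr false
            else if legal_corners.contains cur then Sum.inl true
            else Sum.inl legal
          else Sum.inl legal) st) (Sum.inl false)
  match st with
  | Sum.inl legal => legal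
  | Sum.inr r => r

-- ===== PORT B =====
-- the set comprehension: absolute positions (as pairs) of the occupied tiles
def occ_set (piece : List (List Int)) (base : List Int) : PySem.Set (Int × Int) :=
  PySem.Set.ofList ((PySem.List.enumerate piece).flatMap (fun rp =>
    (PySem.List.enumerate rp.2).filterMap (fun cp =>
      if cp.2 ≠ 0 then
        some (PySem.List.pyGetD base 0 0 + rp.1, PySem.List.pyGetD base 1 0 + cp.1)
      else none)))

-- the board scan: state Sum.inl inside = still looping, Sum.inr v = returned v;
-- `colourCheck` is the tail of the Python loop body (the colour-adjacency test)
def is_move_legal_alt (board : List (List Int)) (move : List (List Int) × List Int) (colour : Int) (legal_corners : List (List Int)) : Bool :=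
  let occ := occ_set move.1 move.2
  let n : Int := (board.length : Int)
  let colourCheck : Int → Int → Int → Int ⊕ Bool := fun r c inside =>
    if (PySem.List.pyGetD (PySem.List.pyGetD board r []) c 0 == colour) &&
       (PySem.Set.contains occ (r - 1, c) || PySem.Set.contains occ (r + 1, c) ||
        PySem.Set.contains occ (r, c - 1) || PySem.Set.contains occ (r, c + 1)) then
      Sum.inr false
    else Sum.inl inside
  let st : Int ⊕ Bool :=
    (PySem.List.pyRange 0 n 1).foldl (fun st r =>
      (PySem.List.pyRange 0 n 1).foldl (fun st c =>
        match st with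
        | Sum.inr v => Sum.inr v
        | Sum.inl inside =>
          if PySem.Set.contains occ (r, c) then
            if PySem.List.pyGetD (PySem.List.pyGetD board r []) c 0 != 0 then Sum.inr false
            else colourCheck r c (inside + 1)
          else colourCheck r c inside) st) (Sum.inl (0 : Int))
  match st with
  | Sum.inr v => v
  | Sum.inl inside =>
    if inside ≠ PySem.Set.len occ then false
    else occ.any (fun p => legal_corners.contains [p.1, p.2])

-- ===== PRECONDITION & SPEC =====
-- Pre_ excludes malformed inputs on which A or B can raise IndexError: a move cell with
-- fewer than two coordinates, or a ragged board with a row shorter than the board's side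
-- (A returns on such inputs only when no occupied tile / scan step touches the missing entries).
def Pre_is_move_legal (board : List (List Int)) (move : List (List Int) × List Int) (colour : Int) (legal_corners : List (List Int)) : Prop :=
  2 ≤ move.2.length ∧ ∀ row ∈ board, board.length ≤ row.length
instance (board : List (List Int)) (move : List (List Int) × List Int) (colour : Int) (legal_corners : List (List Int)) : Decidable (Pre_is_move_legal board move colour legal_corners) := by unfold Pre_is_move_legal; infer_instance

def pvWitness_is_move_legal : List (List Int) × (List (List Int) × List Int) × Int × List (List Int) :=
  ([[0, 0], [0, 0]], (([[1]]), [0, 0]), 1, [[0, 0]])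

def Spec_is_move_legal (board : List (List Int)) (move : List (List Int) × List Int) (colour : Int) (legal_corners : List (List Int)) (out : Bool) : Prop := out = is_move_legal_alt board move colour legal_corners
instance (board : List (List Int)) (move : List (List Int) × List Int) (colour : Int) (legal_corners : List (List Int)) (out : Bool) : Decidable (Spec_is_move_legal board move colour legal_corners out) := by unfold Spec_is_move_legal; infer_instance

-- ===== CLAIM (what is proved, stated in full; the proofs are below) =====
def Claim_equal_is_move_legal : Prop := ∀ (board : List (List Int)) (move : List (List Int) × List Int) (colour : Int) (legal_corners : List (List Int)), Dom_is_move_legal board move colour legal_corners → Pre_is_move_legal board move colour legal_corners → Spec_is_move_legal board move colour legal_corners (is_move_legal board move colour legal_corners)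

-- ===== LEMMAS AND PROOFS =====

-- proof-side vocabulary on pairs
def toCell (p : Int × Int) : List Int := [p.1, p.2]

def occP (piece : List (List Int)) (base : List Int) : List (Int × Int) :=
  (PySem.List.enumerate piece).flatMap (fun rp =>
    (PySem.List.enumerate rp.2).filterMap (fun cp =>
      if cp.2 ≠ 0 then
        some (PySem.List.pyGetD base 0 0 + rp.1, PySem.List.pyGetD base 1 0 + cp.1)
      else none))

def valP (board : List (List Int)) (p : Int × Int) : Int :=
  PySem.List.pyGetD (PySem.List.pyGetD board p.1 []) p.2 0

def nbrs (p : Int × Int) : List (Int × Int) :=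
  [(p.1 - 1, p.2), (p.1 + 1, p.2), (p.1, p.2 - 1), (p.1, p.2 + 1)]

def gridL (n : Int) : List (Int × Int) :=
  (PySem.List.pyRange 0 n 1).product (PySem.List.pyRange 0 n 1)

-- A's per-occupied-cell step
def stepA (board : List (List Int)) (colour : Int) (legal_corners : List (List Int)) (st : Bool ⊕ Bool) (cur : List Int) : Bool ⊕ Bool :=
  match st with
  | Sum.inr r => Sum.inr r
  | Sum.inl legal =>
    if !(is_cell_within_bounds board cur) || !(is_cell_free board cur) then Sum.inr false
    else if is_cell_adjacent_to_colour board cur colour then Sum.inr false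
    else if legal_corners.contains cur then Sum.inl true
    else Sum.inl legal

-- B's per-grid-cell step and its "bad cell" predicate
def stepB (board : List (List Int)) (occ : PySem.Set (Int × Int)) (colour : Int) (st : Int ⊕ Bool) (rc : Int × Int) : Int ⊕ Bool :=
  match st with
  | Sum.inr v => Sum.inr v
  | Sum.inl inside =>
    if PySem.Set.contains occ rc then
      if valP board rc != 0 then Sum.inr false
      else if (valP board rc == colour) && (nbrs rc).any (fun q => PySem.Set.contains occ q) then Sum.inr false
      else Sum.inl (inside + 1)
    else
      if (valP board rc == colour) && (nbrs rc).any (fun q => PySem.Set.contains occ q) then Sum.inr false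
      else Sum.inl inside

def badB (board : List (List Int)) (occ : PySem.Set (Int × Int)) (colour : Int) (rc : Int × Int) : Bool :=
  (PySem.Set.contains occ rc && (valP board rc != 0)) ||
  ((valP board rc == colour) && (nbrs rc).any (fun q => PySem.Set.contains occ q))

theorem foldl_filterMap_opt {α β γ : Type} (g : α → Option β) (f : γ → β → γ) (l : List α) (s : γ) :
    (l.filterMap g).foldl f s = l.foldl (fun s x => match g x with | some y => f s y | none => s) s := by
  induction l generalizing s with
  | nil => rfl
  | cons a t ih =>
    cases h : g a <;> simp [h, ih]

theorem foldl_stepA_inr (board : List (List Int)) (colour : Int) (legal_corners : List (List Int))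
    (r : Bool) (t : List (List Int)) :
    t.foldl (stepA board colour legal_corners) (Sum.inr r) = Sum.inr r := by
  induction t with
  | nil => rfl
  | cons x xs ih => simpa [stepA] using ih

theorem foldl_stepA (board : List (List Int)) (colour : Int) (legal_corners : List (List Int))
    (cells : List (List Int)) (legal : Bool) :
    cells.foldl (stepA board colour legal_corners) (Sum.inl legal) =
      if cells.any (fun cc => !(is_cell_within_bounds board cc && is_cell_free board cc)
            || is_cell_adjacent_to_colour board cc colour) then Sum.inr false
      else Sum.inl (legal || cells.any (fun cc => legal_corners.contains cc)) := by
  induction cells generalizing legal with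
  | nil => simp
  | cons cc t ih =>
    rw [List.foldl_cons]
    cases hwb : is_cell_within_bounds board cc <;>
      cases hfb : is_cell_free board cc <;>
        cases hab : is_cell_adjacent_to_colour board cc colour <;>
          by_cases hcb : cc ∈ legal_corners <;>
            simp [stepA, hwb, hfb, hab, hcb, ih, foldl_stepA_inr, Bool.or_assoc]

theorem any_bad_split (ok adj : List Int → Bool) (l : List (List Int)) :
    l.any (fun x => !ok x || adj x) = (!l.all ok || l.any adj) := by
  induction l with
  | nil => simp
  | cons a t ih => cases h : ok a <;> cases h2 : adj a <;> simp [h, h2, ih]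

-- A's result in canonical form over the pair list occP
theorem is_move_legal_canon (board : List (List Int)) (move : List (List Int) × List Int) (colour : Int) (legal_corners : List (List Int)) :
    is_move_legal board move colour legal_corners =
      (((occP move.1 move.2).all (fun p => is_cell_within_bounds board (toCell p) && is_cell_free board (toCell p))) &&
       !((occP move.1 move.2).any (fun p => is_cell_adjacent_to_colour board (toCell p) colour)) &&
       ((occP move.1 move.2).any (fun p => legal_corners.contains (toCell p)))) := by
  have h1 :
      (PySem.List.enumerate move.1).foldl (fun (st : Bool ⊕ Bool) (rp : Int × List Int) =>
        (PySem.List.enumerate rp.2).foldl (fun (st : Bool ⊕ Bool) (cp : Int × Int) =>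
          match st with
          | Sum.inr r => Sum.inr r
          | Sum.inl legal =>
            if cp.2 ≠ 0 then
              let cur := [PySem.List.pyGetD move.2 0 0 + rp.1, PySem.List.pyGetD move.2 1 0 + cp.1]
              if !(is_cell_within_bounds board cur) || !(is_cell_free board cur) then Sum.inr false
              else if is_cell_adjacent_to_colour board cur colour then Sum.inr false
              else if legal_corners.contains cur then Sum.inl true
              else Sum.inl legal
            else Sum.inl legal) st) (Sum.inl false) =
      ((occP move.1 move.2).map toCell).foldl (stepA board colour legal_corners) (Sum.inl false) := by
    unfold occP
    rw [List.foldl_map, List.foldl_flatMap]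
    apply PySem.List.foldl_congr_mem
    intro st rp _
    rw [foldl_filterMap_opt]
    apply PySem.List.foldl_congr_mem
    intro s cp _
    by_cases h : cp.2 = 0 <;> cases s <;> simp [stepA, toCell, h]
  simp only [is_move_legal]
  rw [h1, foldl_stepA]
  rw [any_bad_split (fun cc => is_cell_within_bounds board cc && is_cell_free board cc)
        (fun cc => is_cell_adjacent_to_colour board cc colour)]
  cases hall : ((occP move.1 move.2).map toCell).all
      (fun cc => is_cell_within_bounds board cc && is_cell_free board cc) <;>
    cases hadj : ((occP move.1 move.2).map toCell).any
        (fun cc => is_cell_adjacent_to_colour board cc colour) <;>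
      simp_all [List.all_map, List.any_map, Function.comp_def]

-- B's loop characterisation
theorem foldl_stepB_inr (board : List (List Int)) (occ : PySem.Set (Int × Int)) (colour : Int)
    (v : Bool) (t : List (Int × Int)) :
    t.foldl (stepB board occ colour) (Sum.inr v) = Sum.inr v := by
  induction t with
  | nil => rfl
  | cons x xs ih => simpa [stepB] using ih

theorem foldl_stepB (board : List (List Int)) (occ : PySem.Set (Int × Int)) (colour : Int)
    (L : List (Int × Int)) (k : Int) :
    L.foldl (stepB board occ colour) (Sum.inl k) =
      if L.any (badB board occ colour) then Sum.inr false
      else Sum.inl (k + (L.countP (fun rc => PySem.Set.contains occ rc) : Int)) := by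
  induction L generalizing k with
  | nil => simp
  | cons rc t ih =>
    rw [List.foldl_cons]
    cases hc : PySem.Set.contains occ rc <;>
      cases hv : (valP board rc != 0) <;>
        cases ha : (valP board rc == colour) && (nbrs rc).any (fun q => PySem.Set.contains occ q) <;>
          simp only [stepB, badB, hc, hv, ha, Bool.false_and, Bool.true_and, Bool.and_false,
            Bool.and_true, Bool.false_or, Bool.true_or, Bool.or_false, Bool.or_true,
            if_true, if_false, foldl_stepB_inr, ih, List.any_cons, List.countP_cons] <;>
          simp [hc, foldl_stepB_inr, ih] <;> push_cast <;> ring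

-- bridges between A's List-Int cells and pair vocabulary
theorem wb_toCell (board : List (List Int)) (p : Int × Int) :
    is_cell_within_bounds board (toCell p) =
      decide (0 ≤ p.1 ∧ p.1 < (board.length : Int) ∧ 0 ≤ p.2 ∧ p.2 < (board.length : Int)) := by
  simp [is_cell_within_bounds, toCell, pysem]

theorem col_toCell (board : List (List Int)) (p : Int × Int) :
    get_cell_colour board (toCell p) = valP board p := by
  simp [get_cell_colour, toCell, valP, pysem]

theorem adj_toCell (board : List (List Int)) (p : Int × Int) (colour : Int) :
    is_cell_adjacent_to_colour board (toCell p) colour =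
      (nbrs p).any (fun q =>
        is_cell_within_bounds board (toCell q) && (get_cell_colour board (toCell q) == colour)) := by
  simp only [is_cell_adjacent_to_colour]
  have h0 : PySem.List.pyGetD (toCell p) 0 0 = p.1 := by simp [toCell, pysem]
  have h1 : PySem.List.pyGetD (toCell p) 1 0 = p.2 := by simp [toCell, pysem]
  rw [h0, h1,
    show ([[p.1 - 1, p.2], [p.1 + 1, p.2], [p.1, p.2 - 1], [p.1, p.2 + 1]] : List (List Int)) =
      (nbrs p).map toCell from rfl, List.any_map]
  rfl

theorem contains_ofList (S : List (Int × Int)) (p : Int × Int) :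
    PySem.Set.contains (PySem.Set.ofList S) p = decide (p ∈ S) := by
  by_cases h : p ∈ S <;> simp [PySem.Set.contains, PySem.Set.mem_ofList, h]

theorem any_ofList (S : List (Int × Int)) (f : Int × Int → Bool) :
    (PySem.Set.ofList S).any f = S.any f := by
  rw [Bool.eq_iff_iff]; simp only [List.any_eq_true]
  constructor <;> rintro ⟨x, hx, hfx⟩ <;> exact ⟨x, by simpa [PySem.Set.mem_ofList] using hx, hfx⟩

theorem mem_gridL (n a b : Int) : ((a, b) ∈ gridL n) ↔ (0 ≤ a ∧ a < n ∧ 0 ≤ b ∧ b < n) := by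
  simp [gridL, List.pair_mem_product, PySem.List.mem_pyRange_one]; tauto

theorem nodup_gridL (n : Int) : (gridL n).Nodup :=
  (PySem.List.nodup_pyRange_one 0 n).product (PySem.List.nodup_pyRange_one 0 n)

theorem nbrs_symm (p q : Int × Int) : q ∈ nbrs p ↔ p ∈ nbrs q := by
  rcases p with ⟨a, b⟩; rcases q with ⟨c, d⟩
  simp [nbrs, Prod.ext_iff]; omega

theorem nested_eq {σ : Type} (f : σ → Int × Int → σ) (l1 l2 : List Int) (init : σ) :
    l1.foldl (fun st r => l2.foldl (fun st c => f st (r, c)) st) init =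
      (l1.product l2).foldl f init := by
  rw [List.product, List.foldl_flatMap]
  apply PySem.List.foldl_congr_mem
  intro st r _
  rw [List.foldl_map]

theorem countP_grid (n : Int) (occ : List (Int × Int)) (hocc : occ.Nodup) :
    (gridL n).countP (fun rc => PySem.Set.contains occ rc) =
      (occ.filter (fun p => decide (p ∈ gridL n))).length := by
  have h1 : (fun rc => PySem.Set.contains occ rc) = (fun rc => decide (rc ∈ occ)) :=
    funext fun rc => by by_cases h : rc ∈ occ <;> simp [PySem.Set.contains, h]
  rw [h1, List.countP_eq_length_filter]
  apply List.Perm.length_eq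
  apply (List.perm_ext_iff_of_nodup ((nodup_gridL n).filter _) (hocc.filter _)).2
  intro x; simp [List.mem_filter]; tauto

-- B rewritten over the flat grid and stepB
theorem alt_eq_canon (board : List (List Int)) (move : List (List Int) × List Int) (colour : Int) (legal_corners : List (List Int)) :
    is_move_legal_alt board move colour legal_corners =
      (match (gridL (board.length : Int)).foldl
          (stepB board (PySem.Set.ofList (occP move.1 move.2)) colour) (Sum.inl 0) with
       | Sum.inr v => v
       | Sum.inl inside =>
         if inside ≠ ((PySem.Set.ofList (occP move.1 move.2)).length : Int) then false
         else (PySem.Set.ofList (occP move.1 move.2)).any (fun p => legal_corners.contains [p.1, p.2])) := by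
  have hocc : occ_set move.1 move.2 = PySem.Set.ofList (occP move.1 move.2) := rfl
  simp only [is_move_legal_alt, hocc, PySem.Set.len, gridL]
  rw [← nested_eq]
  have hfold : ∀ (l : List Int),
      l.foldl (fun st r => l.foldl (fun st c =>
        stepB board (PySem.Set.ofList (occP move.1 move.2)) colour st (r, c)) st)
        (Sum.inl (0 : Int)) =
      l.foldl (fun st r => l.foldl (fun (st : Int ⊕ Bool) (c : Int) =>
        match st with
        | Sum.inr v => Sum.inr v
        | Sum.inl inside =>
          if PySem.Set.contains (PySem.Set.ofList (occP move.1 move.2)) (r, c) then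
            if PySem.List.pyGetD (PySem.List.pyGetD board r []) c 0 != 0 then Sum.inr false
            else
              if (PySem.List.pyGetD (PySem.List.pyGetD board r []) c 0 == colour) &&
                 (PySem.Set.contains (PySem.Set.ofList (occP move.1 move.2)) (r - 1, c) ||
                  PySem.Set.contains (PySem.Set.ofList (occP move.1 move.2)) (r + 1, c) ||
                  PySem.Set.contains (PySem.Set.ofList (occP move.1 move.2)) (r, c - 1) ||
                  PySem.Set.contains (PySem.Set.ofList (occP move.1 move.2)) (r, c + 1)) then
                Sum.inr false
              else Sum.inl (inside + 1)
          else
            if (PySem.List.pyGetD (PySem.List.pyGetD board r []) c 0 == colour) &&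
               (PySem.Set.contains (PySem.Set.ofList (occP move.1 move.2)) (r - 1, c) ||
                PySem.Set.contains (PySem.Set.ofList (occP move.1 move.2)) (r + 1, c) ||
                PySem.Set.contains (PySem.Set.ofList (occP move.1 move.2)) (r, c - 1) ||
                PySem.Set.contains (PySem.Set.ofList (occP move.1 move.2)) (r, c + 1)) then
              Sum.inr false
            else Sum.inl inside) st) (Sum.inl (0 : Int)) := by
    intro l
    apply PySem.List.foldl_congr_mem; intro st r _
    apply PySem.List.foldl_congr_mem; intro st c _
    cases st <;> simp [stepB, valP, nbrs, Bool.or_assoc]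
  rw [hfold]

theorem alt_eq_canon2 (board : List (List Int)) (move : List (List Int) × List Int) (colour : Int) (legal_corners : List (List Int)) :
    is_move_legal_alt board move colour legal_corners =
      (if (gridL (board.length : Int)).any
            (badB board (PySem.Set.ofList (occP move.1 move.2)) colour) then false
       else if (0 + ((gridL (board.length : Int)).countP
              (fun rc => PySem.Set.contains (PySem.Set.ofList (occP move.1 move.2)) rc) : Int)) ≠
            ((PySem.Set.ofList (occP move.1 move.2)).length : Int) then false
       else (PySem.Set.ofList (occP move.1 move.2)).any (fun p => legal_corners.contains [p.1, p.2])) := by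
  rw [alt_eq_canon, foldl_stepB]
  by_cases h : (gridL (board.length : Int)).any
      (badB board (PySem.Set.ofList (occP move.1 move.2)) colour) = true
  · rw [if_pos h, if_pos h]
  · rw [if_neg h, if_neg h]

-- main equivalence
theorem is_move_legal_eq_alt (board : List (List Int)) (move : List (List Int) × List Int) (colour : Int) (legal_corners : List (List Int)) :
    is_move_legal board move colour legal_corners = is_move_legal_alt board move colour legal_corners := by
  rw [is_move_legal_canon, alt_eq_canon2]
  by_cases hbad : (gridL (board.length : Int)).any
      (badB board (PySem.Set.ofList (occP move.1 move.2)) colour) = true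
  · -- some grid cell is bad: both sides are false
    rw [if_pos hbad, Bool.eq_false_iff]
    intro hA
    simp only [Bool.and_eq_true, List.all_eq_true, Bool.not_eq_true', List.any_eq_true] at hA
    obtain ⟨⟨hok, hnadj⟩, _⟩ := hA
    obtain ⟨rc, hrcg, hrcbad⟩ := List.any_eq_true.mp hbad
    obtain ⟨hwb1, hwb2, hwb3, hwb4⟩ := (mem_gridL _ rc.1 rc.2).1 (by simpa using hrcg)
    simp only [badB, contains_ofList, Bool.or_eq_true, Bool.and_eq_true, decide_eq_true_eq,
      bne_iff_ne, beq_iff_eq, List.any_eq_true] at hrcbad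
    rcases hrcbad with ⟨hmem, hval⟩ | ⟨hval, q, hq, hqmem⟩
    · -- occupied cell with a non-zero board value contradicts hok
      have := hok rc hmem
      simp only [is_cell_free, col_toCell, Bool.and_eq_true, beq_iff_eq] at this
      exact hval this.2.2
    · -- a colour cell with an occupied neighbour contradicts hnadj
      have hadjq : is_cell_adjacent_to_colour board (toCell q) colour = true := by
        rw [adj_toCell]
        refine List.any_eq_true.mpr ⟨rc, (nbrs_symm rc q).1 hq, ?_⟩
        simp [wb_toCell, col_toCell, hwb1, hwb2, hwb3, hwb4, hval]
      have hany : ((occP move.1 move.2).any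
          (fun p => is_cell_adjacent_to_colour board (toCell p) colour)) = true :=
        List.any_eq_true.mpr ⟨q, hqmem, hadjq⟩
      rw [hnadj] at hany
      exact Bool.false_ne_true hany
  · rw [if_neg hbad]
    rw [countP_grid _ _ (PySem.Set.nodup_ofList _)]
    by_cases hall : ∀ p ∈ (PySem.Set.ofList (occP move.1 move.2)), p ∈ gridL (board.length : Int)
    · have hlen : ((PySem.Set.ofList (occP move.1 move.2)).filter
          (fun p => decide (p ∈ gridL (board.length : Int)))).length =
          (PySem.Set.ofList (occP move.1 move.2)).length := by
        rw [List.length_filter_eq_length_iff]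
        intro a ha; simpa using hall a ha
      rw [hlen, if_neg (by simp)]
      -- no bad cell + all occupied cells on board: A's bounds/free/adjacency checks pass
      simp only [List.any_eq_true, badB, contains_ofList, Bool.or_eq_true, Bool.and_eq_true,
        decide_eq_true_eq, bne_iff_ne, beq_iff_eq, not_exists, not_or, not_and] at hbad
      have hin : ∀ p ∈ occP move.1 move.2, p ∈ gridL (board.length : Int) := by
        intro p hp; exact hall p (by simpa [PySem.Set.mem_ofList] using hp)
      have hok : ((occP move.1 move.2).all
          (fun p => is_cell_within_bounds board (toCell p) && is_cell_free board (toCell p))) = true := by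
        simp only [List.all_eq_true]
        intro p hp
        have hg := hin p hp
        obtain ⟨h1, h2, h3, h4⟩ := (mem_gridL _ p.1 p.2).1 (by simpa using hg)
        have hb := hbad p hg
        have hval : valP board p = 0 := by
          have h := hb.1 hp
          omega
        simp [wb_toCell, is_cell_free, col_toCell, hval, h1, h2, h3, h4]
      have hadj : ((occP move.1 move.2).any
          (fun p => is_cell_adjacent_to_colour board (toCell p) colour)) = false := by
        rw [Bool.eq_false_iff]
        intro hA
        obtain ⟨p, hp, hpadj⟩ := List.any_eq_true.mp hA
        rw [adj_toCell] at hpadj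
        obtain ⟨q, hqn, hq⟩ := List.any_eq_true.mp hpadj
        simp only [wb_toCell, col_toCell, Bool.and_eq_true, decide_eq_true_eq, beq_iff_eq] at hq
        obtain ⟨⟨h1, h2, h3, h4⟩, hcol⟩ := hq
        have hqg : q ∈ gridL (board.length : Int) := by
          rcases q with ⟨qa, qb⟩; exact (mem_gridL _ qa qb).2 ⟨h1, h2, h3, h4⟩
        rcases hbad q hqg with ⟨_, hno⟩
        exact hno hcol p ((nbrs_symm p q).1 hqn) hp
      rw [hok, hadj]
      simp only [Bool.true_and, Bool.not_false, Bool.and_true]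
      rw [any_ofList]
      rfl
    · -- some occupied cell off the board: count mismatch on B, bounds failure on A
      have hlt : ((PySem.Set.ofList (occP move.1 move.2)).filter
          (fun p => decide (p ∈ gridL (board.length : Int)))).length ≠
          (PySem.Set.ofList (occP move.1 move.2)).length := by
        intro h
        exact hall fun a ha => by simpa using (List.length_filter_eq_length_iff).1 h a ha
      rw [if_pos (by push_cast; omega)]
      rw [Bool.eq_false_iff]
      intro hA
      simp only [Bool.and_eq_true, List.all_eq_true] at hA
      obtain ⟨⟨hok, _⟩, _⟩ := hA
      apply hall
      intro p hp
      have hp' : p ∈ occP move.1 move.2 := by simpa [PySem.Set.mem_ofList] using hp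
      have := hok p hp'
      simp only [wb_toCell, Bool.and_eq_true, decide_eq_true_eq] at this
      obtain ⟨⟨h1, h2, h3, h4⟩, _⟩ := this
      rcases p with ⟨pa, pb⟩
      exact (mem_gridL _ pa pb).2 ⟨h1, h2, h3, h4⟩

-- ===== VERDICT (by name: the statement is the Claim_ definition above) =====
theorem is_move_legal_spec : Claim_equal_is_move_legal := by
  intro board move colour legal_corners _ _
  exact is_move_legal_eq_alt board move colour legal_corners
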